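-- pv_equiv track=rewrite | github.com/dobot0101/python-coding-test | 리스트_1의합_개수.py | solution
-- ===== SOURCE A (Python) =====
-- from itertools import combinations
--
-- def solution(U, L, C):
--     upper_arr = [0 for _ in range(len(C))]
--     lower_arr = [0 for _ in range(len(C))]
--     idx_arr = []
--     for i in range(len(C)):
--         if C[i] == 2:
--             upper_arr[i] = 1
--             lower_arr[i] = 1
--         elif C[i] == 0:
--             upper_arr[i] = 0
--             lower_arr[i] = 0
--         elif C[i] == 1:
--             idx_arr.append(i)
--             upper_arr[i] = 1
--             lower_arr[i] = 0
--
--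
--     if validate_possible(upper_arr, lower_arr, U, L):
--         return make_result_str(upper_arr, lower_arr)
--     else:
--         # upper_arr와 lower_arr의 1을 바꿔가며 각 arr의 1개수 확인
--         for i in range(1, len(idx_arr) + 1):
--             for j in list(combinations(idx_arr, i)):
--                 for k in j:
--                     temp = upper_arr[k]
--                     upper_arr[k] = lower_arr[k]
--                     lower_arr[k] = temp
--                 if validate_possible(upper_arr, lower_arr, U, L):
--                     return make_result_str(upper_arr, lower_arr)
--
--         return 'IMPOSSIBLE'
--
-- def make_result_str(upper_arr, lower_arr):
--     return ''.join(map(str, upper_arr)) + ',' + ''.join(map(str, lower_arr))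
--
-- def validate_possible(upper_arr, lower_arr, U, L):
--     if upper_arr.count(1) == U and lower_arr.count(1) == L:
--         return True
--     else:
--         return False
-- ===== SOURCE B (Python) =====
-- def solution(U, L, C):
--     c2 = sum(1 for c in C if c == 2)
--     m = sum(1 for c in C if c == 1)
--     b = L - c2
--     if b < 0 or b > m or U != c2 + (m - b):
--         return 'IMPOSSIBLE'
--     upper = []
--     lower = []
--     r = b
--     for c in C:
--         if c == 2:
--             upper.append('1')
--             lower.append('1')
--         elif c == 1:
--             if r > 0:
--                 upper.append('0')
--                 lower.append('1')
--                 r -= 1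
--             else:
--                 upper.append('1')
--                 lower.append('0')
--         else:
--             upper.append('0')
--             lower.append('0')
--     return ''.join(upper) + ',' + ''.join(lower)
-- ===== Notes on version B (the rewrite author's own statement) =====
-- stated objective: faster
-- what changed: B replaces A's brute-force cumulative swapping over all itertools.combinations of the flexible positions by a closed-form feasibility check (b = L - count2 must lie in [0, m] with U = count2 + m - b) and a single pass that flips the first b flexible positions, which is exactly the first configuration A's enumeration reaches.
import Mathlib
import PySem

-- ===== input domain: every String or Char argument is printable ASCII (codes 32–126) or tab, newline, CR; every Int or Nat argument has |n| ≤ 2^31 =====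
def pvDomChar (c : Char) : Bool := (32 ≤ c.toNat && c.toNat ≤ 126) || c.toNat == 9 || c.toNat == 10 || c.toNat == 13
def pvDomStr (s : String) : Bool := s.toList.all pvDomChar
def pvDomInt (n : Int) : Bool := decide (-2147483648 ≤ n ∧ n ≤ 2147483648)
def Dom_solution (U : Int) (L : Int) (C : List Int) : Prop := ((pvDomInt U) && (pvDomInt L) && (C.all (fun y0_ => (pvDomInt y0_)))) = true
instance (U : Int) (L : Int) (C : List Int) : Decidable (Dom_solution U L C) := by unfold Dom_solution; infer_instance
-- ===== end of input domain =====

-- B replaces A's brute-force cumulative toggling over all combinations (exponential) by a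
-- closed-form feasibility check plus one pass that flips the first b flexible positions.

-- ===== PORT A =====
-- the first loop of A: builds upper_arr, lower_arr and idx_arr index by index
-- (idx entries are the loop counter i, always ≥ 0, carried as Nat)
def initLoop : List Int → Nat → (List Int × List Int × List Nat)
  | [], _ => ([], [], [])
  | c :: rest, i =>
    let r := initLoop rest (i + 1)
    if c = 2 then (1 :: r.1, 1 :: r.2.1, r.2.2)
    else if c = 0 then (0 :: r.1, 0 :: r.2.1, r.2.2)
    else if c = 1 then (1 :: r.1, 0 :: r.2.1, i :: r.2.2)
    else (0 :: r.1, 0 :: r.2.1, r.2.2)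

def validatePossible (u l : List Int) (U L : Int) : Bool :=
  if (u.count 1 : Int) = U ∧ (l.count 1 : Int) = L then true else false

def makeResultStr (u l : List Int) : String :=
  PySem.Str.join "" (u.map PySem.Int.toStr) ++ "," ++ PySem.Str.join "" (l.map PySem.Int.toStr)

-- itertools.combinations(xs, i) in its enumeration order
def combos : List Nat → Nat → List (List Nat)
  | _, 0 => [[]]
  | [], _ + 1 => []
  | x :: xs, i + 1 => (combos xs i).map (fun t => x :: t) ++ combos xs (i + 1)

-- the swap 'temp = upper[k]; upper[k] = lower[k]; lower[k] = temp'
def toggleAt (ul : List Int × List Int) (k : Nat) : List Int × List Int :=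
  let temp := ul.1.getD k 0
  (ul.1.set k (ul.2.getD k 0), ul.2.set k temp)

-- the nested 'for i … for j …' loop, flattened to the single sequence of combinations it
-- visits; the state (upper, lower) is threaded cumulatively exactly as in A
def tryCombos : List (List Nat) → (List Int × List Int) → Int → Int → String
  | [], _, _, _ => "IMPOSSIBLE"
  | j :: rest, ul, Uv, Lv =>
    let ul' := j.foldl toggleAt ul
    if validatePossible ul'.1 ul'.2 Uv Lv then makeResultStr ul'.1 ul'.2
    else tryCombos rest ul' Uv Lv

def solution (U : Int) (L : Int) (C : List Int) : String :=
  let r := initLoop C 0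
  if validatePossible r.1 r.2.1 U L then makeResultStr r.1 r.2.1
  else tryCombos ((PySem.List.pyRange 1 ((r.2.2.length : Int) + 1) 1).flatMap
                    (fun i => combos r.2.2 i.toNat)) (r.1, r.2.1) U L

-- ===== PORT B =====
-- B's single pass: flips the first r flexible (C[i]==1) positions; rows built as char lists,
-- String.mk ports ''.join over the accumulated single-character pieces
def buildRows : List Int → Int → (List Char × List Char)
  | [], _ => ([], [])
  | c :: rest, r =>
    if c = 2 then
      let p := buildRows rest r; ('1' :: p.1, '1' :: p.2)
    else if c = 1 then
      if r > 0 then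
        let p := buildRows rest (r - 1); ('0' :: p.1, '1' :: p.2)
      else
        let p := buildRows rest r; ('1' :: p.1, '0' :: p.2)
    else
      let p := buildRows rest r; ('0' :: p.1, '0' :: p.2)

def solution_alt (U : Int) (L : Int) (C : List Int) : String :=
  let c2 : Int := C.count 2
  let m : Int := C.count 1
  let b : Int := L - c2
  if b < 0 ∨ m < b ∨ U ≠ c2 + (m - b) then "IMPOSSIBLE"
  else
    let p := buildRows C b
    String.mk p.1 ++ "," ++ String.mk p.2

-- ===== PRECONDITION & SPEC =====
def Spec_solution (U : Int) (L : Int) (C : List Int) (out : String) : Prop := out = solution_alt U L C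
instance (U : Int) (L : Int) (C : List Int) (out : String) : Decidable (Spec_solution U L C out) := by unfold Spec_solution; infer_instance

-- ===== CLAIM (what is proved, stated in full; the proofs are below) =====
def Claim_equal_solution : Prop := ∀ (U : Int) (L : Int) (C : List Int), Dom_solution U L C → Spec_solution U L C (solution U L C)

-- ===== LEMMAS AND PROOFS =====

-- abstract state after flipping the first r flexible positions (numeric twin of buildRows)
def stU : List Int → Int → List Int
  | [], _ => []
  | c :: rest, r =>
    if c = 2 then 1 :: stU rest r
    else if c = 1 then (if r > 0 then 0 :: stU rest (r - 1) else 1 :: stU rest r)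
    else 0 :: stU rest r

def stL : List Int → Int → List Int
  | [], _ => []
  | c :: rest, r =>
    if c = 2 then 1 :: stL rest r
    else if c = 1 then (if r > 0 then 1 :: stL rest (r - 1) else 0 :: stL rest r)
    else 0 :: stL rest r

def idxN : List Int → Nat → List Nat
  | [], _ => []
  | c :: rest, i => if c = 1 then i :: idxN rest (i + 1) else idxN rest (i + 1)

theorem initLoop_eq (C : List Int) : ∀ i, initLoop C i = (stU C 0, stL C 0, idxN C i) := by
  induction C with
  | nil => intro i; rfl
  | cons c rest ih =>
    intro i
    simp only [initLoop, stU, stL, idxN, ih]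
    by_cases h2 : c = 2 <;> by_cases h0 : c = 0 <;> by_cases h1 : c = 1 <;>
      simp_all

theorem idxN_succ (C : List Int) : ∀ i, idxN C (i + 1) = (idxN C i).map (· + 1) := by
  induction C with
  | nil => intro i; rfl
  | cons c rest ih =>
    intro i
    simp only [idxN]
    by_cases h : c = 1 <;> simp [h, ih]

theorem idxN_length (C : List Int) : ∀ i, (idxN C i).length = C.count 1 := by
  induction C with
  | nil => intro i; rfl
  | cons c rest ih =>
    intro i
    simp only [idxN, List.count_cons]
    by_cases h : c = 1 <;> simp [h, ih]

theorem mem_idxN (C : List Int) : ∀ k, k ∈ idxN C 0 → C[k]? = some 1 := by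
  induction C with
  | nil => intro k hk; simp [idxN] at hk
  | cons c rest ih =>
    intro k hk
    simp only [idxN] at hk
    by_cases h : c = 1
    · rw [if_pos h, idxN_succ] at hk
      rcases List.mem_cons.mp hk with h0 | hmap
      · subst h0; simp [h]
      · obtain ⟨k', hk', rfl⟩ := List.mem_map.mp hmap
        simpa using ih k' hk'
    · rw [if_neg h, idxN_succ] at hk
      obtain ⟨k', hk', rfl⟩ := List.mem_map.mp hk
      simpa using ih k' hk'

theorem count_stU (C : List Int) : ∀ r : Int, 0 ≤ r →
    ((stU C r).count 1 : Int) = C.count 2 + ((C.count 1 : Int) - min r (C.count 1)) := by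
  induction C with
  | nil => intro r hr; simp [stU]; omega
  | cons c rest ih =>
    intro r hr
    simp only [stU]
    split_ifs with h2 h1 hrp
    · have := ih r hr
      simp [List.count_cons, h2]; push_cast; omega
    · have := ih (r - 1) (by omega)
      simp [List.count_cons, h1]; push_cast; omega
    · have := ih r hr
      simp [List.count_cons, h1]; push_cast; omega
    · have := ih r hr
      simp [List.count_cons, h1, h2]; push_cast; omega

theorem count_stL (C : List Int) : ∀ r : Int, 0 ≤ r →
    ((stL C r).count 1 : Int) = C.count 2 + min r (C.count 1) := by
  induction C with
  | nil => intro r hr; simp [stL]; omega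
  | cons c rest ih =>
    intro r hr
    simp only [stL]
    split_ifs with h2 h1 hrp
    · have := ih r hr
      simp [List.count_cons, h2]; push_cast; omega
    · have := ih (r - 1) (by omega)
      simp [List.count_cons, h1]; push_cast; omega
    · have := ih r hr
      simp [List.count_cons, h1]; push_cast; omega
    · have := ih r hr
      simp [List.count_cons, h1, h2]; push_cast; omega

-- one singleton toggle advances the abstract state by one
theorem step_toggle (C : List Int) : ∀ (t k : Nat), (idxN C 0)[t]? = some k →
    toggleAt (stU C t, stL C t) k = (stU C (t + 1), stL C (t + 1)) := by
  induction C with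
  | nil => intro t k hk; simp [idxN] at hk
  | cons c rest ih =>
    intro t k hk
    by_cases h1 : c = 1
    · rw [show idxN (c :: rest) 0 = 0 :: (idxN rest 0).map (· + 1) by
        simp [idxN, h1, idxN_succ]] at hk
      cases t with
      | zero =>
        simp at hk
        subst hk
        simp [stU, stL, h1, toggleAt]
      | succ s =>
        rw [List.getElem?_cons_succ, List.getElem?_map] at hk
        cases hks : (idxN rest 0)[s]? with
        | none => rw [hks] at hk; simp at hk
        | some k' =>
          rw [hks] at hk
          simp at hk
          subst hk
          have := ih s k' hks
          simp only [toggleAt] at this ⊢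
          have e2 : ((s : Int) + 1 + 1 : Int) > 0 := by positivity
          simp only [stU, stL, h1, if_neg (by norm_num : ¬ ((1:Int) = 2))] at *
          push_cast
          rw [if_pos (by push_cast; omega), if_pos (by push_cast; omega)]
          simp only [List.set_cons_succ, List.getD_cons_succ]
          have hs1 : ((s : Int) + 1 - 1 : Int) = (s : Int) := by ring
          have hs2 : ((s : Int) + 1 + 1 - 1 : Int) = (s : Int) + 1 := by ring
          rw [hs1, hs2]
          simp only [Prod.mk.injEq] at this
          have e3 : (0:Int) ≤ (s:Int) + 1 := by positivity
          simp only [List.getD_eq_getElem?_getD] at this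
          simp [this.1, this.2, e3]
    · rw [show idxN (c :: rest) 0 = (idxN rest 0).map (· + 1) by
        simp [idxN, h1, idxN_succ]] at hk
      rw [List.getElem?_map] at hk
      cases hks : (idxN rest 0)[t]? with
      | none => rw [hks] at hk; simp at hk
      | some k' =>
        rw [hks] at hk
        simp at hk
        subst hk
        have := ih t k' hks
        simp only [toggleAt] at this ⊢
        simp only [Prod.mk.injEq] at this
        simp only [List.getD_eq_getElem?_getD] at this
        by_cases h2 : c = 2 <;>
          simp only [stU, stL, h1, h2, if_true, if_false,
            List.set_cons_succ, List.getD_cons_succ] <;>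
          simp [this.1, this.2]

-- running the singleton combinations from state t returns at state β
theorem run_singles (C : List Int) (Uv Lv : Int) (β : Nat)
    (hβ1 : 1 ≤ β) (hβm : β ≤ (idxN C 0).length)
    (hU : Uv = (C.count 2 : Int) + ((C.count 1 : Int) - β))
    (hL : Lv = (C.count 2 : Int) + β) :
    ∀ d t bs, t + d = β → t < β →
    tryCombos (((idxN C 0).drop t).map (fun k => [k]) ++ bs) (stU C t, stL C t) Uv Lv
      = makeResultStr (stU C β) (stL C β) := by
  intro d
  induction d with
  | zero => intro t bs h1 h2; omega
  | succ d ihd =>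
    intro t bs hsum ht
    have htlen : t < (idxN C 0).length := by omega
    rw [List.drop_eq_getElem_cons htlen]
    simp only [List.map_cons, List.cons_append, tryCombos, List.foldl_cons, List.foldl_nil]
    rw [step_toggle C t ((idxN C 0)[t]) (by simp [htlen])]
    have hm : (idxN C 0).length = C.count 1 := idxN_length C 0
    have hcu := count_stU C ((t:Int)+1) (by positivity)
    have hcl := count_stL C ((t:Int)+1) (by positivity)
    by_cases hend : t + 1 = β
    · have hv : validatePossible (stU C ((t:Int)+1)) (stL C ((t:Int)+1)) Uv Lv = true := by
        simp only [validatePossible, if_pos, if_neg]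
        rw [if_pos]
        exact ⟨by rw [hcu]; omega, by rw [hcl]; omega⟩
      push_cast
      rw [hv]
      simp only [if_true]
      have : ((t:Int) + 1) = (β : Nat) := by push_cast; omega
      rw [this]
    · have hv : validatePossible (stU C ((t:Int)+1)) (stL C ((t:Int)+1)) Uv Lv = false := by
        simp only [validatePossible]
        rw [if_neg]
        intro ⟨e1, e2⟩
        rw [hcl] at e2
        omega
      push_cast
      rw [hv]
      simp only [Bool.false_eq_true, if_false]
      have := ihd (t + 1) bs (by omega) (by omega)
      push_cast at this
      exact this

-- the pointwise invariant every reachable (upper, lower) state satisfies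
def Inv3 : List Int → List Int → List Int → Prop
  | [], [], [] => True
  | c :: C', a :: u', d :: l' =>
      (if c = 2 then a = 1 ∧ d = 1
       else if c = 1 then ((a = 1 ∧ d = 0) ∨ (a = 0 ∧ d = 1))
       else (a = 0 ∧ d = 0)) ∧ Inv3 C' u' l'
  | _, _, _ => False

theorem inv_init (C : List Int) : ∀ r, Inv3 C (stU C r) (stL C r) := by
  induction C with
  | nil => intro r; trivial
  | cons c rest ih =>
    intro r
    simp only [stU, stL]
    by_cases h2 : c = 2
    · simp [h2, Inv3, ih]
    · by_cases h1 : c = 1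
      · by_cases hr : r > 0 <;> simp [h1, h2, hr, Inv3, ih]
      · simp [h1, h2, Inv3, ih]

theorem inv_counts (C : List Int) : ∀ u l, Inv3 C u l →
    ((u.count 1 : Int) + l.count 1 = 2 * C.count 2 + C.count 1 ∧
     (C.count 2 : Int) ≤ l.count 1 ∧ (l.count 1 : Int) ≤ C.count 2 + C.count 1) := by
  induction C with
  | nil =>
    intro u l h
    cases u <;> cases l <;> simp [Inv3] at h ⊢
  | cons c rest ih =>
    intro u l h
    cases u with
    | nil => cases l <;> simp [Inv3] at h
    | cons a u' =>
      cases l with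
      | nil => simp [Inv3] at h
      | cons d l' =>
        obtain ⟨hhead, htail⟩ := h
        obtain ⟨hsum, hlo, hhi⟩ := ih u' l' htail
        rw [List.count_cons, List.count_cons, List.count_cons, List.count_cons]
        by_cases h2 : c = 2
        · rw [if_pos h2] at hhead
          obtain ⟨rfl, rfl⟩ := hhead
          simp only [h2]
          norm_num
          omega
        · by_cases h1 : c = 1
          · rw [if_neg h2, if_pos h1] at hhead
            rcases hhead with ⟨rfl, rfl⟩ | ⟨rfl, rfl⟩ <;>
              · simp only [h1]
                norm_num
                omega
          · rw [if_neg h2, if_neg h1] at hhead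
            obtain ⟨rfl, rfl⟩ := hhead
            have e2 : (c == 2) = false := by simp [h2]
            have e1 : (c == 1) = false := by simp [h1]
            simp only [e1, e2]
            norm_num
            omega

theorem inv_toggle (C : List Int) : ∀ (u l : List Int) (k : Nat), Inv3 C u l → C[k]? = some 1 →
    Inv3 C (u.set k (l.getD k 0)) (l.set k (u.getD k 0)) := by
  induction C with
  | nil => intro u l k h hk; simp at hk
  | cons c rest ih =>
    intro u l k h hk
    cases u with
    | nil => cases l <;> simp [Inv3] at h
    | cons a u' =>
      cases l with
      | nil => simp [Inv3] at h
      | cons d l' =>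
        obtain ⟨hhead, htail⟩ := h
        cases k with
        | zero =>
          simp at hk
          rw [hk] at hhead
          simp only [if_neg (by norm_num : ¬ ((1:Int) = 2)), if_pos rfl] at hhead
          simp only [List.set_cons_zero, List.getD_cons_zero, Inv3, hk]
          rcases hhead with ⟨rfl, rfl⟩ | ⟨rfl, rfl⟩ <;>
            simp only [if_neg (by norm_num : ¬ ((1:Int) = 2)), if_pos rfl] <;>
            exact ⟨by simp, htail⟩
        | succ k' =>
          simp only [List.getElem?_cons_succ] at hk
          simp only [List.set_cons_succ, List.getD_cons_succ, Inv3]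
          exact ⟨hhead, ih u' l' k' htail hk⟩

theorem inv_toggle_fold (C : List Int) (j : List Nat) : ∀ (ul : List Int × List Int),
    (∀ k ∈ j, C[k]? = some 1) → Inv3 C ul.1 ul.2 →
    Inv3 C (j.foldl toggleAt ul).1 (j.foldl toggleAt ul).2 := by
  induction j with
  | nil => intro ul _ h; simpa using h
  | cons k j' ih =>
    intro ul hmem h
    simp only [List.foldl_cons]
    exact ih _ (fun x hx => hmem x (List.mem_cons_of_mem _ hx))
      (inv_toggle C ul.1 ul.2 k h (hmem k (List.mem_cons_self)))

theorem combos_mem : ∀ (xs : List Nat) (i : Nat) (j : List Nat), j ∈ combos xs i →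
    ∀ k ∈ j, k ∈ xs := by
  intro xs
  induction xs with
  | nil =>
    intro i j hj k hk
    cases i with
    | zero => simp [combos] at hj; subst hj; simp at hk
    | succ i => simp [combos] at hj
  | cons x xs' ih =>
    intro i j hj k hk
    cases i with
    | zero => simp [combos] at hj; subst hj; simp at hk
    | succ i =>
      simp only [combos, List.mem_append, List.mem_map] at hj
      rcases hj with ⟨t, ht, rfl⟩ | hj
      · rcases List.mem_cons.mp hk with rfl | hk'
        · exact List.mem_cons_self
        · exact List.mem_cons_of_mem _ (ih i t ht k hk')
      · exact List.mem_cons_of_mem _ (ih (i + 1) j hj k hk)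

theorem run_imposs (C : List Int) (Uv Lv : Int)
    (hnv : ∀ u l, Inv3 C u l → validatePossible u l Uv Lv = false) :
    ∀ (js : List (List Nat)) (ul : List Int × List Int),
    (∀ j ∈ js, ∀ k ∈ j, C[k]? = some 1) → Inv3 C ul.1 ul.2 →
    tryCombos js ul Uv Lv = "IMPOSSIBLE" := by
  intro js
  induction js with
  | nil => intro ul _ _; rfl
  | cons j js' ih =>
    intro ul hmem hinv
    simp only [tryCombos]
    have hinv' := inv_toggle_fold C j ul (hmem j (List.mem_cons_self)) hinv
    rw [hnv _ _ hinv']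
    simp only [Bool.false_eq_true, if_false]
    exact ih _ (fun x hx => hmem x (List.mem_cons_of_mem _ hx)) hinv'

theorem combos_one : ∀ xs : List Nat, combos xs 1 = xs.map (fun k => [k]) := by
  intro xs
  induction xs with
  | nil => rfl
  | cons x xs' ih => simp [combos, ih]

-- result-string bridge: A's join of 0/1 ints equals B's char rows
theorem rows_eq (C : List Int) : ∀ r,
    ((stU C r).map PySem.Int.toStr = (buildRows C r).1.map (fun c => String.mk [c])) ∧
    ((stL C r).map PySem.Int.toStr = (buildRows C r).2.map (fun c => String.mk [c])) := by
  induction C with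
  | nil => intro r; simp [stU, stL, buildRows]
  | cons c rest ih =>
    intro r
    simp only [stU, stL, buildRows]
    by_cases h2 : c = 2
    · simp [h2, (ih r).1, (ih r).2, PySem.Int.toStr] <;> decide
    · by_cases h1 : c = 1
      · by_cases hr : r > 0
        · simp [h1, h2, hr, (ih (r-1)).1, (ih (r-1)).2, PySem.Int.toStr] <;> decide
        · simp [h1, h2, hr, (ih r).1, (ih r).2, PySem.Int.toStr] <;> decide
      · simp [h1, h2, (ih r).1, (ih r).2, PySem.Int.toStr] <;> decide

theorem mk_toList (cs : List Char) : (String.mk cs).toList = cs :=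
  Eq.symm (String.ofList_eq.mp rfl)

theorem join_singletons (cs : List Char) :
    PySem.Str.join "" (cs.map (fun c => String.mk [c])) = String.mk cs := by
  apply String.ext
  simp only [PySem.Str.toList_join]
  have h1 : List.map String.toList (List.map (fun c => String.mk [c]) cs)
      = cs.map (fun c => [c]) := by
    rw [List.map_map]
    exact List.map_congr_left (fun a _ => by simp only [Function.comp_apply, mk_toList])
  rw [show "".toList = ([] : List Char) from rfl, h1, PySem.Chars.join_nil_singletons,
    mk_toList]

theorem makeResult_eq (C : List Int) (r : Int) :
    makeResultStr (stU C r) (stL C r)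
      = String.mk (buildRows C r).1 ++ "," ++ String.mk (buildRows C r).2 := by
  rw [makeResultStr, (rows_eq C r).1, (rows_eq C r).2, join_singletons, join_singletons]

-- ===== VERDICT (by name: the statement is the Claim_ definition above) =====
theorem solution_spec : Claim_equal_solution := by
  intro U L C _
  unfold Spec_solution solution solution_alt
  rw [initLoop_eq C 0]
  have hcu0 := count_stU C 0 le_rfl
  have hcl0 := count_stL C 0 le_rfl
  have hlen : ((idxN C 0).length : Int) = (C.count 1 : Int) := by rw [idxN_length]
  by_cases hv0 : validatePossible (stU C 0) (stL C 0) U L = true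
  · -- initial arrays already valid: U = c2 + m, L = c2, so b = 0
    have hUL : ((stU C 0).count 1 : Int) = U ∧ ((stL C 0).count 1 : Int) = L := by
      by_contra hcon
      simp only [validatePossible, if_neg hcon] at hv0
      exact Bool.false_ne_true hv0
    obtain ⟨hU, hL⟩ := hUL
    rw [if_pos hv0, if_neg (by omega :
      ¬(L - (C.count 2 : Int) < 0 ∨ (C.count 1 : Int) < L - (C.count 2 : Int) ∨
        U ≠ (C.count 2 : Int) + ((C.count 1 : Int) - (L - (C.count 2 : Int)))))]
    have hb : L - ((C.count 2 : Int)) = (0 : Int) := by omega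
    rw [hb]
    simpa using makeResult_eq C 0
  · rw [if_neg hv0]
    by_cases hfeas : 0 ≤ L - (C.count 2 : Int) ∧ L - (C.count 2 : Int) ≤ (C.count 1 : Int) ∧
        U = (C.count 2 : Int) + ((C.count 1 : Int) - (L - (C.count 2 : Int)))
    · -- feasible, and b ≠ 0 since the initial check failed
      obtain ⟨hb0, hbm, hU⟩ := hfeas
      have hbne : L - (C.count 2 : Int) ≠ 0 := by
        intro h0
        apply hv0
        simp only [validatePossible]
        rw [if_pos (show ((List.count 1 (stU C 0) : Int) = U ∧ (List.count 1 (stL C 0) : Int) = L)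
          from ⟨by omega, by omega⟩)]
      set β : Nat := (L - (C.count 2 : Int)).toNat with hβ
      have hβc : (β : Int) = L - (C.count 2 : Int) := Int.toNat_of_nonneg hb0
      have hβ1 : 1 ≤ β := by omega
      have hβm : β ≤ (idxN C 0).length := by omega
      have hm1 : (1 : Int) < ((idxN C 0).length : Int) + 1 := by omega
      rw [PySem.List.pyRange_one_cons hm1]
      simp only [List.flatMap_cons]
      rw [show ((1 : Int)).toNat = 1 from rfl, combos_one]
      have hrun := run_singles C U L β hβ1 hβm (by push_cast; omega) (by push_cast; omega)
        β 0 ((List.flatMap (fun i => combos (idxN C 0) i.toNat)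
          (PySem.List.pyRange 2 ((idxN C 0).length + 1) 1))) (by omega) (by omega)
      norm_num at hrun
      rw [show ((1:Int) + 1) = 2 by norm_num]
      rw [hrun]
      rw [if_neg (by omega :
        ¬(L - (C.count 2 : Int) < 0 ∨ (C.count 1 : Int) < L - (C.count 2 : Int) ∨
          U ≠ (C.count 2 : Int) + ((C.count 1 : Int) - (L - (C.count 2 : Int)))))]
      rw [← hβc]
      simpa using makeResult_eq C β
    · -- infeasible: no reachable state ever validates
      have hnv : ∀ u l, Inv3 C u l → validatePossible u l U L = false := by
        intro u l hinv
        obtain ⟨hsum, hlo, hhi⟩ := inv_counts C u l hinv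
        simp only [validatePossible]
        rw [if_neg]
        intro ⟨e1, e2⟩
        exact hfeas ⟨by omega, by omega, by omega⟩
      rw [run_imposs C U L hnv _ (stU C 0, stL C 0)
        (by
          intro j hj k hk
          simp only [List.mem_flatMap] at hj
          obtain ⟨i, _, hjc⟩ := hj
          exact mem_idxN C k (combos_mem (idxN C 0) i.toNat j hjc k hk))
        (inv_init C 0)]
      rw [if_pos (by omega)]
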